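-- pv_equiv track=rewrite | github.com/Veenkar/indexer | index.py | skipPaths
-- ===== SOURCE A (Python) =====
-- def skipPaths(paths, skiplist):
--     # paths = self.toGlob(paths)
--     new_paths = []
--     for path in paths:
--         append = True
--         for skip_path in skiplist:
--             # TODO re-egzamine sh path matching (prev: if path.match(skip_path))
--             if skip_path in str(path):
--                 append = False
--         if append:
--             new_paths.append(str(path))
--     return new_paths
-- ===== SOURCE B (Python) =====
-- # B inverts A's loop nesting: filter the surviving paths once per skip substring,
-- # so a path removed by an early skip is never scanned against later skips.
-- def skipPaths(paths, skiplist):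
--     remaining = [str(p) for p in paths]
--     for skip in skiplist:
--         remaining = [p for p in remaining if skip not in p]
--     return remaining
-- ===== Notes on version B (the rewrite author's own statement) =====
-- stated objective: faster
-- what changed: Inverts the loop nesting: instead of testing every skip substring inside a per-path flag loop, B folds over the skiplist, filtering the surviving path list once per skip substring, so a path removed by an early skip is never scanned against the remaining skips.
import Mathlib
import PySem

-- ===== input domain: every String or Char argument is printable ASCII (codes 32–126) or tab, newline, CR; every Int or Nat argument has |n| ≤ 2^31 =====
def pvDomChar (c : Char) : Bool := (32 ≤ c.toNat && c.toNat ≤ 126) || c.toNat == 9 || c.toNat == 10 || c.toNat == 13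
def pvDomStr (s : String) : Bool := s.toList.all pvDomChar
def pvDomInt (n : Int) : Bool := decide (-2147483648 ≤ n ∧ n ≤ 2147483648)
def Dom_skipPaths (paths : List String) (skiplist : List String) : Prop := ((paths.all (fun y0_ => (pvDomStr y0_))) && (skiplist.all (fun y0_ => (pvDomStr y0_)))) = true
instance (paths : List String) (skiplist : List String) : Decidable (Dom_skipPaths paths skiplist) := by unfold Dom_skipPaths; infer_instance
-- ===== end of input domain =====

-- ===== PORT A =====
-- Port of A: per-path flag loop over the whole skiplist, append if no skip matched.
def skipPaths (paths : List String) (skiplist : List String) : List String :=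
  paths.foldl (fun new_paths path =>
    let append := skiplist.foldl (fun ap skip_path =>
      if PySem.Str.isIn skip_path path then false else ap) true
    if append then new_paths ++ [path] else new_paths) []

-- ===== PORT B =====
-- Port of B: fold over the skiplist, filtering the surviving paths once per skip substring.
def skipPaths_alt (paths : List String) (skiplist : List String) : List String :=
  skiplist.foldl (fun remaining skip =>
    remaining.filter (fun p => !PySem.Str.isIn skip p)) (paths.map (fun p => p))

-- ===== PRECONDITION & SPEC =====
def Spec_skipPaths (paths : List String) (skiplist : List String) (out : List String) : Prop := out = skipPaths_alt paths skiplist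
instance (paths : List String) (skiplist : List String) (out : List String) : Decidable (Spec_skipPaths paths skiplist out) := by unfold Spec_skipPaths; infer_instance

-- ===== CLAIM (what is proved, stated in full; the proofs are below) =====
def Claim_equal_skipPaths : Prop := ∀ (paths : List String) (skiplist : List String), Dom_skipPaths paths skiplist → Spec_skipPaths paths skiplist (skipPaths paths skiplist)

-- ===== LEMMAS AND PROOFS =====

-- ===== VERDICT (by name: the statement is the Claim_ definition above) =====
-- A's inner flag loop computes "no skip substring occurs in path".
lemma flag_loop_eq (skiplist : List String) (path : String) :
    skiplist.foldl (fun ap skip_path =>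
      if PySem.Str.isIn skip_path path then false else ap) true
      = skiplist.all (fun sp => !PySem.Str.isIn sp path) := by
  rw [PySem.List.foldl_if_false_eq]
  simp [List.all_eq_not_any_not]

-- A is the filter of paths by "no skip matches".
lemma portA_eq_filter (paths skiplist : List String) :
    skipPaths paths skiplist
      = paths.filter (fun p => skiplist.all (fun sp => !PySem.Str.isIn sp p)) := by
  unfold skipPaths
  have hc : paths.foldl (fun new_paths path =>
        let append := skiplist.foldl (fun ap skip_path =>
          if PySem.Str.isIn skip_path path then false else ap) true
        if append then new_paths ++ [path] else new_paths) []
      = paths.foldl (fun acc x =>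
        if skiplist.all (fun sp => !PySem.Str.isIn sp x) then acc ++ [x] else acc) [] :=
    PySem.List.foldl_congr_mem _ _ _ _ (by intro acc x _; simp only [flag_loop_eq])
  rw [hc, PySem.List.foldl_append_if_eq_filter, List.nil_append]

-- B's repeated filtering is the same single filter by the conjunction of all tests.
lemma portB_eq_filter (skiplist : List String) (paths : List String) :
    skiplist.foldl (fun remaining skip =>
      remaining.filter (fun p => !PySem.Str.isIn skip p)) paths
      = paths.filter (fun p => skiplist.all (fun sp => !PySem.Str.isIn sp p)) := by
  induction skiplist generalizing paths with
  | nil => simp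
  | cons sk tl ih =>
    simp only [List.foldl_cons, ih, List.filter_filter, List.all_cons]
    congr 1
    funext p
    rw [Bool.and_comm]

theorem skipPaths_spec : Claim_equal_skipPaths := by
  intro paths skiplist _
  unfold Spec_skipPaths skipPaths_alt
  rw [portA_eq_filter, portB_eq_filter, List.map_id']
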